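-- pv_equiv track=rewrite | github.com/nithishkumar-dev-10/memtomem-stm | src/memtomem_stm/proxy/compression.py | _find_break
-- ===== SOURCE A (Python) =====
-- def _find_break(text: str, max_chars: int) -> int:
--     if max_chars <= 0:
--         return 0
--     end = min(max_chars, len(text) - 1)
--     floor = max(1, int(max_chars * 0.8))
--     for i in range(end, floor - 1, -1):
--         if i >= 1 and text[i - 1] in ".!?\n。！？" and (i >= len(text) or text[i] in " \n\t"):
--             return i
--     for i in range(end, floor - 1, -1):
--         if i < len(text) and text[i] in " \n\t":
--             return i
--     return max_chars
-- ===== SOURCE B (Python) =====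
-- def _find_break(text: str, max_chars: int) -> int:
--     if max_chars <= 0:
--         return 0
--     end = min(max_chars, len(text) - 1)
--     floor = max(1, max_chars * 4 // 5)
--     best_sentence = None
--     best_whitespace = None
--     for i in range(floor, end + 1):
--         if text[i] in " \n\t":
--             if text[i - 1] in ".!?\n。！？":
--                 best_sentence = i
--             else:
--                 best_whitespace = i
--     if best_sentence is not None:
--         return best_sentence
--     if best_whitespace is not None:
--         return best_whitespace
--     return max_chars
-- ===== Notes on version B (the rewrite author's own statement) =====
-- stated objective: alternative
-- what changed: Replaces A's two backward scans (sentence pass, then whitespace pass) with a single forward loop keeping two last-match accumulators, dropping the always-true/always-false guards (i>=1, i>=len, i<len) implied by the loop bounds; int(max_chars*0.8) becomes the exact integer max_chars*4//5.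
import Mathlib
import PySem

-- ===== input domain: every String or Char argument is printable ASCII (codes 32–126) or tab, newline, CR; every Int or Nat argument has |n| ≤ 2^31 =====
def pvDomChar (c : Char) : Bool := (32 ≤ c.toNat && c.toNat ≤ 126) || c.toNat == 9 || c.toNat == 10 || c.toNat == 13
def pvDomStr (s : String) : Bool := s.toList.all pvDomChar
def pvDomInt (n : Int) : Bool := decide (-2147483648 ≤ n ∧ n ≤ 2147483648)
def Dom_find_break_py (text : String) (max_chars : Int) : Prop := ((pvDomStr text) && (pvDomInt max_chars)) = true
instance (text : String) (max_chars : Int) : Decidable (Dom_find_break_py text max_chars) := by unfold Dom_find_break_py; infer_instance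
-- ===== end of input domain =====

-- B replaces A's two backward scans with one forward loop keeping two last-match accumulators
-- and drops the guards made redundant by the loop bounds (alternative decomposition, same cost).

-- ===== PORT A =====
-- character classes both sources test with  «in ".!?\n。！？"»  /  «in " \n\t"»
def pvPunct : List Char := ['.', '!', '?', '\n', '。', '！', '？']
def pvWsp : List Char := [' ', '\n', '\t']

-- «text[j] in <set>» at an index the source has already guarded in range (none cannot occur there)
def pvMemAt (cset : List Char) (cs : List Char) (j : Int) : Bool :=
  match PySem.List.pyGet? cs j with
  | some c => cset.contains c
  | none => false

-- condition of A's first loop, literally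
def pvCondA1 (cs : List Char) (n : Int) (i : Int) : Bool :=
  decide (1 ≤ i) && pvMemAt pvPunct cs (i - 1) && (decide (n ≤ i) || pvMemAt pvWsp cs i)

-- condition of A's second loop, literally
def pvCondA2 (cs : List Char) (n : Int) (i : Int) : Bool :=
  decide (i < n) && pvMemAt pvWsp cs i

def find_break_py (text : String) (max_chars : Int) : Int :=
  if max_chars ≤ 0 then 0
  else
    let cs := text.toList
    let n : Int := cs.length
    let e := min max_chars (n - 1)
    -- int(max_chars * 0.8): for 0 < max_chars ≤ 2^31 (Dom) the IEEE-double product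
    -- truncates exactly to max_chars * 4 // 5, which is what we port
    let fl := max 1 (PySem.Int.floordiv (max_chars * 4) 5)
    match (PySem.List.pyRange e (fl - 1) (-1)).find? (pvCondA1 cs n) with
    | some i => i
    | none =>
      match (PySem.List.pyRange e (fl - 1) (-1)).find? (pvCondA2 cs n) with
      | some i => i
      | none => max_chars

-- ===== PORT B =====
-- one iteration of B's forward loop: state = (best_sentence, best_whitespace)
def pvStepB (cs : List Char) (st : Option Int × Option Int) (i : Int) : Option Int × Option Int :=
  if pvMemAt pvWsp cs i then
    if pvMemAt pvPunct cs (i - 1) then (some i, st.2) else (st.1, some i)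
  else st

def find_break_py_alt (text : String) (max_chars : Int) : Int :=
  if max_chars ≤ 0 then 0
  else
    let cs := text.toList
    let e := min max_chars ((cs.length : Int) - 1)
    let fl := max 1 (PySem.Int.floordiv (max_chars * 4) 5)
    let st := (PySem.List.pyRange fl (e + 1) 1).foldl (pvStepB cs) (none, none)
    match st.1 with
    | some i => i
    | none =>
      match st.2 with
      | some i => i
      | none => max_chars

-- ===== PRECONDITION & SPEC =====
def Spec_find_break_py (text : String) (max_chars : Int) (out : Int) : Prop := out = find_break_py_alt text max_chars
instance (text : String) (max_chars : Int) (out : Int) : Decidable (Spec_find_break_py text max_chars out) := by unfold Spec_find_break_py; infer_instance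

-- ===== CLAIM (what is proved, stated in full; the proofs are below) =====
def Claim_equal_find_break_py : Prop := ∀ (text : String) (max_chars : Int), Dom_find_break_py text max_chars → Spec_find_break_py text max_chars (find_break_py text max_chars)

-- ===== LEMMAS AND PROOFS =====

-- the "sentence break" and "plain whitespace break" tests of B
def pvP (cs : List Char) (i : Int) : Bool := pvMemAt pvWsp cs i && pvMemAt pvPunct cs (i - 1)
def pvQ (cs : List Char) (i : Int) : Bool := pvMemAt pvWsp cs i && !pvMemAt pvPunct cs (i - 1)

theorem pvStepB_fst (cs : List Char) (st : Option Int × Option Int) (i : Int) :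
    (pvStepB cs st i).1 = if pvP cs i then some i else st.1 := by
  unfold pvStepB pvP
  by_cases h1 : pvMemAt pvWsp cs i <;> by_cases h2 : pvMemAt pvPunct cs (i - 1) <;>
    simp [h1, h2]

theorem pvStepB_snd (cs : List Char) (st : Option Int × Option Int) (i : Int) :
    (pvStepB cs st i).2 = if pvQ cs i then some i else st.2 := by
  unfold pvStepB pvQ
  by_cases h1 : pvMemAt pvWsp cs i <;> by_cases h2 : pvMemAt pvPunct cs (i - 1) <;>
    simp [h1, h2]

-- B's fold computes, in each component, the LAST match of the list (first match of the reverse)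
theorem foldl_stepB (cs : List Char) (l : List Int) (st : Option Int × Option Int) :
    l.foldl (pvStepB cs) st =
      ((l.reverse.find? (pvP cs)).or st.1, (l.reverse.find? (pvQ cs)).or st.2) := by
  induction l generalizing st with
  | nil => simp
  | cons x t ih =>
    rw [List.foldl_cons, ih]
    rw [List.reverse_cons, List.find?_append, List.find?_append]
    by_cases hp : pvP cs x <;> by_cases hq : pvQ cs x <;>
      simp [pvStepB_fst, pvStepB_snd, hp, hq, List.find?]

theorem find?_congr_mem {α : Type} (l : List α) (f g : α → Bool)
    (h : ∀ x ∈ l, f x = g x) : l.find? f = l.find? g := by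
  induction l with
  | nil => rfl
  | cons x t ih =>
    simp only [List.find?]
    rw [h x (by simp)]
    cases g x
    · exact ih fun y hy => h y (by simp [hy])
    · rfl

-- the generic core: A's two backward scans over range(e, fl-1, -1) equal B's single
-- forward fold over range(fl, e+1, 1), given 1 ≤ fl and e < n
theorem core_eq (cs : List Char) (n e fl d : Int) (hfl : 1 ≤ fl) (hen : e ≤ n - 1) :
    (match (PySem.List.pyRange e (fl - 1) (-1)).find? (pvCondA1 cs n) with
     | some i => i
     | none =>
       match (PySem.List.pyRange e (fl - 1) (-1)).find? (pvCondA2 cs n) with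
       | some i => i
       | none => d) =
    (match ((PySem.List.pyRange fl (e + 1) 1).reverse.find? (pvP cs)) with
     | some i => i
     | none =>
       match ((PySem.List.pyRange fl (e + 1) 1).reverse.find? (pvQ cs)) with
       | some i => i
       | none => d) := by
  have hR : PySem.List.pyRange e (fl - 1) (-1) = (PySem.List.pyRange fl (e + 1) 1).reverse := by
    rw [PySem.List.pyRange_neg_one_eq_reverse]
    norm_num
  rw [hR]
  have hmem : ∀ i ∈ (PySem.List.pyRange fl (e + 1) 1).reverse, fl ≤ i ∧ i ≤ e := by
    intro i hi
    rw [List.mem_reverse, PySem.List.mem_pyRange_one] at hi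
    omega
  have h1 : (PySem.List.pyRange fl (e + 1) 1).reverse.find? (pvCondA1 cs n) =
      (PySem.List.pyRange fl (e + 1) 1).reverse.find? (pvP cs) := by
    apply find?_congr_mem
    intro i hi
    obtain ⟨hl, hu⟩ := hmem i hi
    unfold pvCondA1 pvP
    have h1i : decide (1 ≤ i) = true := by simp; omega
    have hni : decide (n ≤ i) = false := by simp; omega
    rw [h1i, hni]
    cases pvMemAt pvWsp cs i <;> cases pvMemAt pvPunct cs (i - 1) <;> rfl
  rw [h1]
  cases hfind : (PySem.List.pyRange fl (e + 1) 1).reverse.find? (pvP cs) with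
  | some i => rfl
  | none =>
    have hnone := List.find?_eq_none.mp hfind
    have h2 : (PySem.List.pyRange fl (e + 1) 1).reverse.find? (pvCondA2 cs n) =
        (PySem.List.pyRange fl (e + 1) 1).reverse.find? (pvQ cs) := by
      apply find?_congr_mem
      intro i hi
      obtain ⟨hl, hu⟩ := hmem i hi
      have hpi := hnone i hi
      unfold pvP at hpi
      unfold pvCondA2 pvQ
      have hin : decide (i < n) = true := by simp; omega
      rw [hin]
      cases hw : pvMemAt pvWsp cs i <;> cases hpu : pvMemAt pvPunct cs (i - 1) <;>
        simp_all
    rw [h2]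

-- ===== VERDICT (by name: the statement is the Claim_ definition above) =====
theorem find_break_py_spec : Claim_equal_find_break_py := by
  intro text max_chars _dom
  unfold Spec_find_break_py find_break_py find_break_py_alt
  by_cases h0 : max_chars ≤ 0
  · simp [h0]
  · simp only [h0, if_false]
    rw [foldl_stepB]
    simp only [Option.or_none]
    exact core_eq text.toList (text.toList.length : Int)
      (min max_chars ((text.toList.length : Int) - 1))
      (max 1 (PySem.Int.floordiv (max_chars * 4) 5)) max_chars
      (le_max_left _ _) (min_le_right _ _)
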